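-- pv_equiv track=rewrite | github.com/Qubacki01/Functions | 7-19/repeated_module.py | f
-- ===== SOURCE A (Python) =====
-- from collections import Counter
--
-- def f(number):
--     num_str = str(number)
--     digit_counts = Counter(num_str)
--
--     repeated_sum = 0
--
--     for digit, count in digit_counts.items():
--         if count > 1:
--             repeated_sum += int(digit) * count
--
--     return repeated_sum
-- ===== SOURCE B (Python) =====
-- def f(number):
--     # Per-occurrence scan: each digit occurrence contributes itself iff the
--     # same character appears at some OTHER position (checked by membership in
--     # the rest of the string) -- no occurrence counts are ever computed.
--     chars = list(str(number))
--     total = 0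
--     for i, c in enumerate(chars):
--         if c in chars[:i] or c in chars[i+1:]:
--             total += int(c)
--     return total
-- ===== Notes on version B (the rewrite author's own statement) =====
-- stated objective: alternative
-- what changed: Replaces the Counter build plus per-distinct-digit pass by a per-occurrence scan: each character position contributes its digit iff the same character occurs at some other position (membership test in the rest of the string), so no occurrence counts are ever computed.
import Mathlib
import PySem

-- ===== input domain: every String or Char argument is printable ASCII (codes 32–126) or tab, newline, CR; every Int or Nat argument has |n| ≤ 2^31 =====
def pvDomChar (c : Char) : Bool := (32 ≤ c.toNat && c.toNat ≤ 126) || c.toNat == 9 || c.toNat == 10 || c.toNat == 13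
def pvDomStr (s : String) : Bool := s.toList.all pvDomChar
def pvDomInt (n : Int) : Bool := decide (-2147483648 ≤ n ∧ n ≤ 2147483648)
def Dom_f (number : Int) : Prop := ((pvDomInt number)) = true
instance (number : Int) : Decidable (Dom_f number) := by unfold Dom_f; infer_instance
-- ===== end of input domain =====

-- B replaces the Counter build and per-distinct-digit pass by a per-occurrence scan:
-- each position contributes its digit iff the same character occurs at some other
-- position (membership in the rest of the string); no counts are computed (alternative).

-- int(ch) for a single character, shared by both ports; in str(number) only digit
-- characters can repeat, so the `getD 0` fallback (Python's ValueError) is unreachable.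
def pvVal (c : Char) : Int := (PySem.Int.ofChars? [c]).getD 0

-- ===== PORT A =====
def f (number : Int) : Int :=
  let numStr := (PySem.Int.toStr number).toList
  let digitCounts := PySem.Dict.counter numStr
  digitCounts.items.foldl
    (fun repeatedSum dc => if dc.2 > 1 then repeatedSum + pvVal dc.1 * dc.2 else repeatedSum) 0

-- ===== PORT B =====
def f_alt (number : Int) : Int :=
  let chars := (PySem.Int.toStr number).toList
  (PySem.List.enumerate chars 0).foldl
    (fun total p =>
      if p.2 ∈ PySem.List.slice chars none (some p.1) ∨
         p.2 ∈ PySem.List.slice chars (some (p.1 + 1)) none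
      then total + pvVal p.2 else total) 0

-- ===== PRECONDITION & SPEC =====
def Spec_f (number : Int) (out : Int) : Prop := out = f_alt number
instance (number : Int) (out : Int) : Decidable (Spec_f number out) := by unfold Spec_f; infer_instance

-- ===== CLAIM (what is proved, stated in full; the proofs are below) =====
def Claim_equal_f : Prop := ∀ (number : Int), Dom_f number → Spec_f number (f number)

-- ===== LEMMAS AND PROOFS =====

-- the contribution of one distinct character k relative to a character list l (A's shape)
def pvTerm (l : List Char) (k : Char) : Int :=
  if ((l.count k : Int)) > 1 then pvVal k * (l.count k : Int) else 0

-- the contribution of one occurrence x relative to the full list l (B's shape)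
def pvOcc (l : List Char) (x : Char) : Int :=
  if 1 < l.count x then pvVal x else 0

lemma fA_eq (l : List Char) :
    ((PySem.Dict.counter l).items).foldl
      (fun repeatedSum dc => if dc.2 > 1 then repeatedSum + pvVal dc.1 * dc.2 else repeatedSum) 0
    = ((PySem.Set.ofList l).map (pvTerm l)).sum := by
  rw [PySem.Dict.items_counter, List.foldl_map]
  rw [PySem.List.foldl_congr_mem _ _ (fun acc k => acc + pvTerm l k) _
      (by intro acc k _; simp only [pvTerm]; split_ifs <;> simp)]
  rw [PySem.List.foldl_add]
  simp

-- every entry of enumerate is (start + k, l[k])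
lemma mem_enumerate_spec {α : Type} (l : List α) (s : Int) (p : Int × α)
    (hp : p ∈ PySem.List.enumerate l s) :
    ∃ k : Nat, ∃ hk : k < l.length, p.1 = s + (k : Int) ∧ p.2 = l[k] := by
  induction l generalizing s with
  | nil => simp [PySem.List.enumerate_nil] at hp
  | cons x xs ih =>
    rw [PySem.List.enumerate_cons] at hp
    rcases List.mem_cons.mp hp with h | h
    · exact ⟨0, by simp, by simp [h], by simp [h]⟩
    · obtain ⟨k, hk, h1, h2⟩ := ih (s + 1) h
      exact ⟨k + 1, by simpa using hk, by omega, by simpa using h2⟩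

-- the occurrence at position k has another occurrence iff its count exceeds 1
lemma mem_other (l : List Char) (k : Nat) (hk : k < l.length) :
    (l[k] ∈ l.take k ∨ l[k] ∈ l.drop (k + 1)) ↔ 1 < l.count l[k] := by
  have hdrop : l.drop k = l[k] :: l.drop (k + 1) := List.drop_eq_getElem_cons hk
  have hcount : l.count l[k]
      = (l.take k).count l[k] + (1 + (l.drop (k + 1)).count l[k]) := by
    have h0 := congrArg (fun t => List.count l[k] t) (List.take_append_drop k l)
    simp only at h0
    rw [← h0, List.count_append, hdrop, List.count_cons_self]
    omega
  have h1 := List.count_pos_iff (a := l[k]) (l := l.take k)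
  have h2 := List.count_pos_iff (a := l[k]) (l := l.drop (k + 1))
  constructor
  · rintro (h | h)
    · have := h1.mpr h; omega
    · have := h2.mpr h; omega
  · intro h
    by_cases ht : l[k] ∈ l.take k
    · exact Or.inl ht
    · refine Or.inr (h2.mp ?_)
      have : (l.take k).count l[k] = 0 := List.count_eq_zero.mpr ht
      omega

lemma fB_eq (l : List Char) :
    (PySem.List.enumerate l 0).foldl
      (fun total p =>
        if p.2 ∈ PySem.List.slice l none (some p.1) ∨
           p.2 ∈ PySem.List.slice l (some (p.1 + 1)) none
        then total + pvVal p.2 else total) 0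
    = (l.map (pvOcc l)).sum := by
  rw [PySem.List.foldl_congr_mem _ _
      (fun total p => total + pvOcc l p.2) _ ?_]
  · rw [PySem.List.foldl_add]
    have hmm : (PySem.List.enumerate l 0).map (fun p => pvOcc l p.2)
        = ((PySem.List.enumerate l 0).map (·.2)).map (pvOcc l) := by
      rw [List.map_map]
      rfl
    rw [hmm, PySem.List.map_snd_enumerate]
    simp
  · intro acc p hp
    obtain ⟨k, hk, h1, h2⟩ := mem_enumerate_spec l 0 p hp
    have h1' : p.1 = ((k : Nat) : Int) := by omega
    have hcond : (p.2 ∈ PySem.List.slice l none (some p.1) ∨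
        p.2 ∈ PySem.List.slice l (some (p.1 + 1)) none) ↔ 1 < l.count p.2 := by
      have hsl1 : PySem.List.slice l none (some p.1) = l.take k := by
        rw [h1', PySem.List.slice_to_natCast]
      have hsl2 : PySem.List.slice l (some (p.1 + 1)) none = l.drop (k + 1) := by
        have h3 : p.1 + 1 = (((k + 1 : Nat)) : Int) := by omega
        rw [h3, PySem.List.slice_from_natCast]
      rw [hsl1, hsl2, h2]
      exact mem_other l k hk
    simp only [pvOcc]
    rw [if_congr hcond rfl rfl]
    split_ifs <;> simp

-- per-occurrence sums regroup into A's per-distinct-character sums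
lemma sum_occ_eq (n : Nat) : ∀ l : List Char, l.length ≤ n →
    (l.map (pvOcc l)).sum = ((PySem.Set.ofList l).map (pvTerm l)).sum := by
  induction n with
  | zero =>
    intro l hl
    have : l = [] := List.eq_nil_of_length_eq_zero (Nat.le_zero.mp hl)
    subst this
    simp [PySem.Set.ofList, PySem.Set.empty]
  | succ n ih =>
    intro l hl
    cases l with
    | nil => simp [PySem.Set.ofList, PySem.Set.empty]
    | cons c rest =>
      set l' := rest.filter (fun x => !(x == c)) with hl'
      have hperm : (rest.filter (fun x => x == c) ++ l').Perm rest :=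
        List.filter_append_perm _ rest
      have hcnotin : c ∉ l' := by
        intro h
        have := (List.mem_filter.mp h).2
        simp at this
      have hmem_l' : ∀ x ∈ l', x ∈ rest := fun x hx => (List.mem_filter.mp hx).1
      have hne_l' : ∀ x ∈ l', x ≠ c := by
        intro x hx
        have := (List.mem_filter.mp hx).2
        simpa using this
      -- counts of non-c characters agree between c :: rest and l'
      have hcnt : ∀ x, x ≠ c → (c :: rest).count x = l'.count x := by
        intro x hx
        have h0 : (c :: rest).count x = rest.count x := by
          simp [Ne.symm hx]
        rw [h0, ← hperm.count_eq, List.count_append]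
        have : (rest.filter (fun y => y == c)).count x = 0 := by
          refine List.count_eq_zero.mpr ?_
          intro h
          have := (List.mem_filter.mp h).2
          exact hx (by simpa using this)
        omega
      have hoccs : ∀ x ∈ l', pvOcc (c :: rest) x = pvOcc l' x := by
        intro x hx
        simp only [pvOcc, hcnt x (hne_l' x hx)]
      have hterms : ∀ x ∈ PySem.Set.ofList l', pvTerm (c :: rest) x = pvTerm l' x := by
        intro x hx
        have hx' := (PySem.Set.mem_ofList l' x).mp hx
        simp only [pvTerm, hcnt x (hne_l' x hx')]
      -- the filtered-out copies of c all contribute pvOcc (c::rest) c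
      have hccount : ((rest.filter (fun x => x == c)).map (pvOcc (c :: rest))).sum
          = ((rest.count c : Int)) * pvOcc (c :: rest) c := by
        have hconst : (rest.filter (fun x => x == c)).map (pvOcc (c :: rest))
            = (rest.filter (fun x => x == c)).map (fun _ => pvOcc (c :: rest) c) := by
          refine List.map_congr_left ?_
          intro x hx
          have : x = c := by simpa using (List.mem_filter.mp hx).2
          rw [this]
        rw [hconst, PySem.List.sum_map_const_int]
        have hlf : (rest.filter (fun x => x == c)).length = rest.count c := by
          simp [List.count_eq_countP, List.countP_eq_length_filter]
        rw [hlf]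
      have hlen : l'.length ≤ n := by
        have h1 : l'.length ≤ rest.length := List.length_filter_le _ _
        have h2 : rest.length ≤ n := by simpa using Nat.le_of_succ_le_succ hl
        omega
      have hih := ih l' hlen
      -- the distinct characters of c :: rest are c plus those of l'
      have hsetperm : (c :: PySem.Set.ofList l').Perm (PySem.Set.ofList (c :: rest)) := by
        rw [List.perm_ext_iff_of_nodup
            (List.nodup_cons.mpr ⟨fun h => hcnotin ((PySem.Set.mem_ofList l' c).mp h),
              PySem.Set.nodup_ofList l'⟩)
            (PySem.Set.nodup_ofList _)]
        intro a
        simp only [List.mem_cons, PySem.Set.mem_ofList]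
        constructor
        · rintro (rfl | h)
          · exact Or.inl rfl
          · exact Or.inr (hmem_l' a h)
        · rintro (rfl | h)
          · exact Or.inl rfl
          · by_cases hac : a = c
            · exact Or.inl hac
            · exact Or.inr (List.mem_filter.mpr ⟨h, by simpa using hac⟩)
      have hheadterm : pvOcc (c :: rest) c + ((rest.count c : Int)) * pvOcc (c :: rest) c
          = pvTerm (c :: rest) c := by
        simp only [pvOcc, pvTerm, List.count_cons_self]
        split_ifs with h1 h2 h2
        · push_cast; ring
        · omega
        · omega
        · ring
      calc ((c :: rest).map (pvOcc (c :: rest))).sum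
          = pvOcc (c :: rest) c + (rest.map (pvOcc (c :: rest))).sum := by
            rw [List.map_cons, List.sum_cons]
        _ = pvOcc (c :: rest) c
            + (((rest.filter (fun x => x == c)) ++ l').map (pvOcc (c :: rest))).sum := by
            rw [(hperm.map (pvOcc (c :: rest))).sum_eq]
        _ = pvOcc (c :: rest) c + ((rest.count c : Int)) * pvOcc (c :: rest) c
            + (l'.map (pvOcc (c :: rest))).sum := by
            rw [List.map_append, List.sum_append, hccount]; ring
        _ = pvTerm (c :: rest) c + (l'.map (pvOcc l')).sum := by
            rw [List.map_congr_left hoccs, hheadterm]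
        _ = pvTerm (c :: rest) c + ((PySem.Set.ofList l').map (pvTerm l')).sum := by
            rw [hih]
        _ = pvTerm (c :: rest) c
            + ((PySem.Set.ofList l').map (pvTerm (c :: rest))).sum := by
            rw [List.map_congr_left hterms]
        _ = ((c :: PySem.Set.ofList l').map (pvTerm (c :: rest))).sum := by
            rw [List.map_cons, List.sum_cons]
        _ = ((PySem.Set.ofList (c :: rest)).map (pvTerm (c :: rest))).sum :=
            (hsetperm.map (pvTerm (c :: rest))).sum_eq

-- ===== VERDICT (by name: the statement is the Claim_ definition above) =====
theorem f_spec : Claim_equal_f := by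
  intro number _
  unfold Spec_f f f_alt
  set l := (PySem.Int.toStr number).toList with hl
  rw [fA_eq, fB_eq, sum_occ_eq l.length l (le_refl _)]
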